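-- pv_equiv track=rewrite | github.com/sukria/koan | koan/app/memory_manager.py | _extract_session_digest
-- ===== SOURCE A (Python) =====
-- from typing import Dict, List, Optional, Tuple
--
-- def _extract_session_digest(content: str) -> List[str]:
--     """Extract a one-line digest per session from a journal file.
--
--     Parses ## Session N headers and takes the first meaningful line after
--     the ### sub-header (or the header itself if no sub-header).
--     """
--     digests = []
--     current_header = ""
--     found_sub = False
--
--     for line in content.splitlines():
--         if line.startswith("## Session") or line.startswith("## Mode"):
--             if current_header and not found_sub:
--                 digests.append(current_header)
--             current_header = line.strip()
--             found_sub = False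
--         elif line.startswith("### ") and current_header:
--             digests.append(f"{current_header} — {line.lstrip('#').strip()}")
--             found_sub = True
--             current_header = ""
--
--     if current_header and not found_sub:
--         digests.append(current_header)
--
--     return digests
-- ===== SOURCE B (Python) =====
-- def _extract_session_digest(content: str) -> list:
--     """Two-pass digest: group lines into (header, body) segments, then map each segment."""
--     groups = []  # list of (header_line, body_lines)
--     for line in content.splitlines():
--         if line.startswith("## Session") or line.startswith("## Mode"):
--             groups.append((line, []))
--         elif groups:
--             groups[-1][1].append(line)
--     out = []
--     for header, body in groups:
--         sub = next((l for l in body if l.startswith("### ")), None)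
--         if sub is None:
--             out.append(header.strip())
--         else:
--             out.append(f"{header.strip()} — {sub.lstrip('#').strip()}")
--     return out
-- ===== Notes on version B (the rewrite author's own statement) =====
-- stated objective: alternative
-- what changed: Replaces the single stateful delayed-emit pass (carried header + found_sub flag) with two passes: first group the lines into (header, body) segments at session-header boundaries, then map each segment to its digest by finding the first sub-header line in its body.
import Mathlib
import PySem

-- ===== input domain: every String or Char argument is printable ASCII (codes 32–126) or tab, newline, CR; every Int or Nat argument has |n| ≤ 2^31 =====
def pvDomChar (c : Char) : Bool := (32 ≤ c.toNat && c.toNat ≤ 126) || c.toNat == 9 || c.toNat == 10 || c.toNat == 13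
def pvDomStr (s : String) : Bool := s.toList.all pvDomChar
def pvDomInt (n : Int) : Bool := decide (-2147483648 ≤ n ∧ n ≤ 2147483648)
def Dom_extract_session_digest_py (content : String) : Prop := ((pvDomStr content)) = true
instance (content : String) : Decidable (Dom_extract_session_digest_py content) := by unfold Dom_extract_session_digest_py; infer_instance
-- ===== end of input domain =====

-- B replaces A's single stateful delayed-emit pass by a group-into-segments pass followed by a
-- per-segment digest map (alternative decomposition, same cost).

-- shared line predicates / formatting (used verbatim by both Pythons)
def pvIsHeader (l : String) : Bool :=
  PySem.Str.startswith l "## Session" || PySem.Str.startswith l "## Mode"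

def pvIsSub (l : String) : Bool := PySem.Str.startswith l "### "

-- line.lstrip('#').strip(): PySem has no single-sided lstrip with a char set, so the
-- single-char lstrip('#') is ported by hand as dropWhile (· == '#') (exact for one char).
def pvFmtSub (l : String) : String :=
  PySem.Str.strip (String.ofList (l.toList.dropWhile (· == '#')))

-- ===== PORT A =====
-- the for-loop of A, state = (digests, current_header, found_sub); truthiness of a str is ≠ ""
def pvALoop : List String → List String → String → Bool → List String
  | [], ds, cur, found => if !(cur == "") && !found then ds ++ [cur] else ds
  | l :: ls, ds, cur, found =>
    if pvIsHeader l then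
      pvALoop ls (if !(cur == "") && !found then ds ++ [cur] else ds) (PySem.Str.strip l) false
    else if pvIsSub l && !(cur == "") then
      pvALoop ls (ds ++ [cur ++ " — " ++ pvFmtSub l]) "" true
    else
      pvALoop ls ds cur found

def extract_session_digest_py (content : String) : List String :=
  pvALoop (PySem.Str.splitlines content) [] "" false

-- ===== PORT B =====
-- first loop of Source B: group lines into (header, body) segments; Python appends to groups[-1],
-- ported with the groups list held reversed in the accumulator (head = last group).
def pvBuildGroups : List String → List (String × List String) → List (String × List String)
  | [], acc => acc.reverse
  | l :: ls, acc =>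
    if pvIsHeader l then pvBuildGroups ls ((l, []) :: acc)
    else
      match acc with
      | [] => pvBuildGroups ls []
      | (h, body) :: rest => pvBuildGroups ls ((h, body ++ [l]) :: rest)

-- second loop of Source B: one digest per group (next(...) = first match = List.find?)
def pvDigestOf (g : String × List String) : String :=
  match g.2.find? pvIsSub with
  | none => PySem.Str.strip g.1
  | some s => PySem.Str.strip g.1 ++ " — " ++ pvFmtSub s

def extract_session_digest_py_alt (content : String) : List String :=
  (pvBuildGroups (PySem.Str.splitlines content) []).map pvDigestOf

-- ===== PRECONDITION & SPEC =====
def Spec_extract_session_digest_py (content : String) (out : List String) : Prop := out = extract_session_digest_py_alt content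
instance (content : String) (out : List String) : Decidable (Spec_extract_session_digest_py content out) := by unfold Spec_extract_session_digest_py; infer_instance

-- ===== CLAIM (what is proved, stated in full; the proofs are below) =====
def Claim_equal_extract_session_digest_py : Prop := ∀ (content : String), Dom_extract_session_digest_py content → Spec_extract_session_digest_py content (extract_session_digest_py content)

-- ===== LEMMAS AND PROOFS =====

-- common specification both loops are reduced to: skipSpec = no active header, segSpec h = header h open
mutual
def pvSegSpec : String → List String → List String
  | h, [] => [h]
  | h, l :: ls =>
    if pvIsHeader l then h :: pvSegSpec (PySem.Str.strip l) ls
    else if pvIsSub l then (h ++ " — " ++ pvFmtSub l) :: pvSkipSpec ls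
    else pvSegSpec h ls
def pvSkipSpec : List String → List String
  | [] => []
  | l :: ls => if pvIsHeader l then pvSegSpec (PySem.Str.strip l) ls else pvSkipSpec ls
end

-- a header line starts with '#', so its strip is nonempty
lemma pv_strip_header_ne (l : String) (hl : pvIsHeader l = true) :
    (PySem.Str.strip l == "") = false := by
  have hpre : ("## ".toList) <+: l.toList := by
    unfold pvIsHeader at hl
    rcases (Bool.or_eq_true _ _).mp hl with h | h
    · have h' : PySem.Chars.startswith l.toList ("## Session".toList) = true := by
        rw [← PySem.Str.startswith_eq]; exact h
      exact List.IsPrefix.trans (by decide) ((PySem.Chars.startswith_iff _ _).mp h')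
    · have h' : PySem.Chars.startswith l.toList ("## Mode".toList) = true := by
        rw [← PySem.Str.startswith_eq]; exact h
      exact List.IsPrefix.trans (by decide) ((PySem.Chars.startswith_iff _ _).mp h')
  obtain ⟨t, ht⟩ := hpre
  have hlist : l.toList = '#' :: '#' :: ' ' :: t := by rw [← ht]; rfl
  have hmem : '#' ∈ PySem.Chars.lstrip l.toList := by
    rw [hlist]
    unfold PySem.Chars.lstrip
    rw [List.dropWhile_cons]
    simp [show PySem.Chars.isspace '#' = false from by decide]
  have hne : (PySem.Str.strip l).toList ≠ [] := by
    rw [PySem.Str.toList_strip]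
    unfold PySem.Chars.strip PySem.Chars.rstrip
    simp only [List.reverse_eq_nil_iff, ne_eq]
    intro hcontra
    have hall := List.dropWhile_eq_nil_iff.mp hcontra '#' (by simpa using hmem)
    exact (by decide : PySem.Chars.isspace '#' ≠ true) hall
  have : PySem.Str.strip l ≠ "" := fun he => hne (by rw [he]; rfl)
  exact beq_eq_false_iff_ne.mpr this

lemma pv_aLoop_eq :
    ∀ ls : List String,
      (∀ ds found, pvALoop ls ds "" found = ds ++ pvSkipSpec ls) ∧
      (∀ ds h, (h == "") = false → pvALoop ls ds h false = ds ++ pvSegSpec h ls) := by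
  intro ls
  induction ls with
  | nil => simp [pvALoop, pvSkipSpec, pvSegSpec]
  | cons l ls ih =>
    constructor
    · intro ds found
      by_cases hl : pvIsHeader l = true
      · simp only [pvALoop, pvSkipSpec, hl, if_pos, beq_self_eq_true, Bool.not_true,
          Bool.false_and, Bool.false_eq_true, if_false]
        exact ih.2 ds (PySem.Str.strip l) (pv_strip_header_ne l hl)
      · simp only [pvALoop, pvSkipSpec, hl, beq_self_eq_true, Bool.not_true, Bool.and_false,
          Bool.false_eq_true, if_false]
        exact ih.1 ds found
    · intro ds h hh
      by_cases hl : pvIsHeader l = true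
      · simp only [pvALoop, pvSegSpec, hl, hh, Bool.not_false, Bool.and_self, if_true]
        rw [ih.2 (ds ++ [h]) (PySem.Str.strip l) (pv_strip_header_ne l hl)]
        simp
      · by_cases hs : pvIsSub l = true
        · simp only [pvALoop, pvSegSpec, hl, hs, hh, Bool.not_false, Bool.and_true,
            Bool.false_eq_true, if_false, if_true]
          rw [ih.1 (ds ++ [h ++ " — " ++ pvFmtSub l]) true]
          simp
        · simp only [pvALoop, pvSegSpec, hl, hs, Bool.false_and, Bool.false_eq_true, if_false]
          exact ih.2 ds h hh

lemma pv_bGroups_eq :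
    ∀ (ls : List String) (h : String) (body : List String) (rest : List (String × List String)),
      (pvBuildGroups ls ((h, body) :: rest)).map pvDigestOf =
        rest.reverse.map pvDigestOf ++
          (match body.find? pvIsSub with
           | none => pvSegSpec (PySem.Str.strip h) ls
           | some s => (PySem.Str.strip h ++ " — " ++ pvFmtSub s) :: pvSkipSpec ls) := by
  intro ls
  induction ls with
  | nil =>
    intro h body rest
    simp only [pvBuildGroups, List.reverse_cons, List.map_append, List.map_cons, List.map_nil]
    cases hf : body.find? pvIsSub with
    | none => simp [pvDigestOf, hf, pvSegSpec]
    | some s => simp [pvDigestOf, hf, pvSkipSpec]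
  | cons l ls ih =>
    intro h body rest
    by_cases hl : pvIsHeader l = true
    · simp only [pvBuildGroups, hl, if_true]
      rw [ih l [] ((h, body) :: rest)]
      simp only [List.find?_nil, List.reverse_cons, List.map_append, List.map_cons, List.map_nil,
        List.append_assoc]
      cases hf : body.find? pvIsSub with
      | none => simp [pvDigestOf, hf, pvSegSpec, hl]
      | some s => simp [pvDigestOf, hf, pvSkipSpec, hl]
    · simp only [pvBuildGroups, hl, Bool.false_eq_true, if_false]
      rw [ih h (body ++ [l]) rest]
      cases hf : body.find? pvIsSub with
      | none =>
        by_cases hs : pvIsSub l = true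
        · simp [List.find?_append, hf, hs, pvSegSpec, hl]
        · simp [List.find?_append, hf, hs, pvSegSpec, hl]
      | some s =>
        simp [List.find?_append, hf, pvSkipSpec, hl]

lemma pv_b_eq (ls : List String) :
    (pvBuildGroups ls []).map pvDigestOf = pvSkipSpec ls := by
  induction ls with
  | nil => simp [pvBuildGroups, pvSkipSpec]
  | cons l ls ih =>
    by_cases hl : pvIsHeader l = true
    · simp only [pvBuildGroups, hl, if_true]
      rw [pv_bGroups_eq ls l [] []]
      simp [pvSkipSpec, hl]
    · simp only [pvBuildGroups, hl, Bool.false_eq_true, if_false, pvSkipSpec]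
      exact ih

-- ===== VERDICT (by name: the statement is the Claim_ definition above) =====
theorem extract_session_digest_py_spec : Claim_equal_extract_session_digest_py := by
  intro content _
  unfold Spec_extract_session_digest_py extract_session_digest_py extract_session_digest_py_alt
  rw [(pv_aLoop_eq _).1, pv_b_eq]
  rfl
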